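-- pv_equiv track=rewrite | github.com/jaeha13/coding_practice | programmers/완전탐색/모의고사.py | solution
-- ===== SOURCE A (Python) =====
-- def solution(answers):
--     answer = []
--
--     length = len(answers)
--
--     a, b, c = [0 for _ in range(length)], [0 for _ in range(length)], [0 for _ in range(length)]
--     for i in range(length):
--         a[i] = (i % 5) + 1
--         if i % 2 == 0:
--             b[i] = 2
--         elif i % 8 == 1:
--             b[i] = 1
--         elif i % 8 == 3:
--             b[i] = 3
--         elif i % 8 == 5:
--             b[i] = 4
--         elif i % 8 == 7:
--             b[i] = 5
--
--     i = 0
--     while i <= length - 1: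
--         if i % 10 == 0:
--             c[i] = 3
--         elif i % 10 == 2:
--             c[i] = 1
--         elif i % 10 == 4:
--             c[i] = 2
--         elif i % 10 == 6:
--             c[i] = 4
--         else:
--             c[i] = 5
--         if i + 1 <= length - 1:
--             c[i + 1] = c[i]
--         i += 2
--
--     j = 0
--     count1, count2, count3 = 0, 0, 0
--     while j < length:
--         if answers[j] == a[j]:
--             count1 += 1
--         if answers[j] == b[j]:
--             count2 += 1
--         if answers[j] == c[j]:
--             count3 += 1
--         j += 1
--
--     max_count = max(count1, count2, count3)
--
--     if max_count == count1:
--         answer.append(1)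
--     if max_count == count2:
--         answer.append(2)
--     if max_count == count3:
--         answer.append(3)
--
--     return answer
-- ===== SOURCE B (Python) =====
-- def solution(answers):
--     PATTERNS = ([1, 2, 3, 4, 5], [2, 1, 2, 3, 2, 4, 2, 5], [3, 3, 1, 1, 2, 2, 4, 4, 5, 5])
--     # histogram pass: how many times does value v occur at positions congruent to r mod 40
--     freq = {}
--     for i, v in enumerate(answers):
--         key = (i % 40, v)
--         freq[key] = freq.get(key, 0) + 1
--     # each score is 40 table lookups; 40 = lcm of the pattern periods, no per-element comparison
--     s1, s2, s3 = (sum(freq.get((r, p[r % len(p)]), 0) for r in range(40)) for p in PATTERNS)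
--     m = max(s1, s2, s3)
--     return [k for k, s in zip((1, 2, 3), (s1, s2, s3)) if s == m]
-- ===== Notes on version B (the rewrite author's own statement) =====
-- stated objective: alternative
-- what changed: Replaces A's three precomputed length-n answer arrays and per-index comparison loops by a residue-histogram: one pass tallies a frequency table keyed by (index mod 40, value) (40 = lcm of the pattern periods), and each score is then 40 table lookups, with no comparison of answers against patterns during the traversal.
import Mathlib
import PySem

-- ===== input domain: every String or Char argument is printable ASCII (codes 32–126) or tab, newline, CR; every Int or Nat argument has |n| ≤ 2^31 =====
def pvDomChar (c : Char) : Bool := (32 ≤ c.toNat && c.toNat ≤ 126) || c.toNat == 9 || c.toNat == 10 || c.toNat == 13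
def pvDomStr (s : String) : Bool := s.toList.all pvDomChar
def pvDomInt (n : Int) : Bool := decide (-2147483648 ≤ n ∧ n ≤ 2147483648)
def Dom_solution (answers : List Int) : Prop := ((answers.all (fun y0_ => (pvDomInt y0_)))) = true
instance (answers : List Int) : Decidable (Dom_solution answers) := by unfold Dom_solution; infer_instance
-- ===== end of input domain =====

-- B replaces A's three precomputed length-n answer arrays and per-index comparison loops by a
-- residue histogram keyed by (index mod 40, value); each score is then 40 table lookups (alternative).

-- ===== PORT A =====
-- the elif chain writing b[i] inside the first for-loop
def pvIfB (i : Nat) (bv : List Int) : List Int :=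
  if i % 2 = 0 then PySem.List.pySetD bv (i : Int) 2
  else if i % 8 = 1 then PySem.List.pySetD bv (i : Int) 1
  else if i % 8 = 3 then PySem.List.pySetD bv (i : Int) 3
  else if i % 8 = 5 then PySem.List.pySetD bv (i : Int) 4
  else if i % 8 = 7 then PySem.List.pySetD bv (i : Int) 5
  else bv

-- `for i in range(length):` filling a and b
def pvLoopAB (length : Nat) : List Int × List Int :=
  (List.range length).foldl
    (fun ab (i : Nat) => (PySem.List.pySetD ab.1 (i : Int) (((i % 5 : Nat) : Int) + 1), pvIfB i ab.2))
    (List.replicate length 0, List.replicate length 0)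

-- the if/elif/else chain choosing c[i]
def pvCVal (i : Nat) : Int :=
  if i % 10 = 0 then 3 else if i % 10 = 2 then 1 else if i % 10 = 4 then 2
  else if i % 10 = 6 then 4 else 5

-- `while i <= length - 1:` with i += 2; over ints `i <= length - 1` ⟺ `i < length`,
-- and Python's `c[i+1] = c[i]` copies the value just written, i.e. pvCVal i.
def pvLoopC (length : Nat) (c : List Int) (i : Nat) : List Int :=
  if i < length then
    let c1 := PySem.List.pySetD c (i : Int) (pvCVal i)
    let c2 := if i + 1 < length then PySem.List.pySetD c1 ((i + 1 : Nat) : Int) (pvCVal i) else c1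
    pvLoopC length c2 (i + 2)
  else c
termination_by length - i
decreasing_by omega

-- `while j < length:` counting loop over (count1, count2, count3)
def pvLoopJ (answers a b c : List Int) (j : Nat) (s : Int × Int × Int) : Int × Int × Int :=
  if j < answers.length then
    let x := PySem.List.pyGetD answers (j : Int) 0
    pvLoopJ answers a b c (j + 1)
      ((if x = PySem.List.pyGetD a (j : Int) 0 then s.1 + 1 else s.1),
       (if x = PySem.List.pyGetD b (j : Int) 0 then s.2.1 + 1 else s.2.1),
       (if x = PySem.List.pyGetD c (j : Int) 0 then s.2.2 + 1 else s.2.2))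
  else s
termination_by answers.length - j
decreasing_by omega

def solution (answers : List Int) : List Int :=
  let length := answers.length
  let ab := pvLoopAB length
  let c := pvLoopC length (List.replicate length 0) 0
  let s := pvLoopJ answers ab.1 ab.2 c 0 (0, 0, 0)
  let maxCount := max s.1 (max s.2.1 s.2.2)
  let ans : List Int := []
  let ans := if maxCount = s.1 then ans ++ [1] else ans
  let ans := if maxCount = s.2.1 then ans ++ [2] else ans
  let ans := if maxCount = s.2.2 then ans ++ [3] else ans
  ans

-- ===== PORT B =====
def pvP1 : List Int := [1, 2, 3, 4, 5]
def pvP2 : List Int := [2, 1, 2, 3, 2, 4, 2, 5]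
def pvP3 : List Int := [3, 3, 1, 1, 2, 2, 4, 4, 5, 5]

-- `freq[key] = freq.get(key, 0) + 1` over `for i, v in enumerate(answers)`
def pvFreq (answers : List Int) : PySem.Dict (Int × Int) Int :=
  (PySem.List.enumerate answers).foldl
    (fun d iv =>
      let key := (PySem.Int.mod iv.1 40, iv.2)
      d.insert key (d.getD key 0 + 1))
    PySem.Dict.empty

-- `sum(freq.get((r, p[r % len(p)]), 0) for r in range(40))`
def pvScore (freq : PySem.Dict (Int × Int) Int) (p : List Int) : Int :=
  (PySem.List.pyRange 0 40 1).foldl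
    (fun s r => s + freq.getD (r, PySem.List.pyGetD p (PySem.Int.mod r (p.length : Int)) 0) 0) 0

def solution_alt (answers : List Int) : List Int :=
  let freq := pvFreq answers
  let s1 := pvScore freq pvP1
  let s2 := pvScore freq pvP2
  let s3 := pvScore freq pvP3
  let m := max s1 (max s2 s3)
  (List.zip ([1, 2, 3] : List Int) [s1, s2, s3]).filterMap
    (fun ks => if ks.2 = m then some ks.1 else none)

-- ===== PRECONDITION & SPEC =====
def Spec_solution (answers : List Int) (out : List Int) : Prop := out = solution_alt answers
instance (answers : List Int) (out : List Int) : Decidable (Spec_solution answers out) := by unfold Spec_solution; infer_instance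

-- ===== CLAIM (what is proved, stated in full; the proofs are below) =====
def Claim_equal_solution : Prop := ∀ (answers : List Int), Dom_solution answers → Spec_solution answers (solution answers)

-- ===== LEMMAS AND PROOFS =====

-- proof-only: A's counting loop as a fold step over enumerate
def pvStepA (s : Int × Int × Int) (iv : Int × Int) : Int × Int × Int :=
  ((if iv.2 = PySem.List.pyGetD pvP1 (PySem.Int.mod iv.1 5) 0 then s.1 + 1 else s.1),
   (if iv.2 = PySem.List.pyGetD pvP2 (PySem.Int.mod iv.1 8) 0 then s.2.1 + 1 else s.2.1),
   (if iv.2 = PySem.List.pyGetD pvP3 (PySem.Int.mod iv.1 10) 0 then s.2.2 + 1 else s.2.2))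

-- proof-only: the single-pattern cyclic match count, the common value of both programs' scores
def pvCnt (p : List Int) (P : Int) : List Int → Nat → Int
  | [], _ => 0
  | x :: xs, k =>
      (if x = PySem.List.pyGetD p (PySem.Int.mod (k : Int) P) 0 then 1 else 0) + pvCnt p P xs (k + 1)

-- the value A's elif chain stores in b[i] (the final else is unreachable)
def pvFB (i : Nat) : Int :=
  if i % 2 = 0 then 2 else if i % 8 = 1 then 1 else if i % 8 = 3 then 3
  else if i % 8 = 5 then 4 else if i % 8 = 7 then 5 else 0

lemma pvIfB_eq (i : Nat) (bv : List Int) : pvIfB i bv = PySem.List.pySetD bv (i : Int) (pvFB i) := by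
  have h2 : i % 2 = i % 8 % 2 := (Nat.mod_mod_of_dvd i (by norm_num)).symm
  have h8 : i % 8 = 0 ∨ i % 8 = 1 ∨ i % 8 = 2 ∨ i % 8 = 3 ∨ i % 8 = 4 ∨ i % 8 = 5 ∨ i % 8 = 6 ∨ i % 8 = 7 := by omega
  rcases h8 with h | h | h | h | h | h | h | h <;>
    simp [pvIfB, pvFB, h2, h]

-- a fold of pySetD writes keeps the length
lemma pvLen_setFold (f : Nat → Int) (xs0 : List Int) (n : Nat) :
    ((List.range n).foldl (fun xs (i : Nat) => PySem.List.pySetD xs (i : Int) (f i)) xs0).length = xs0.length := by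
  induction n with
  | zero => simp
  | succ n ih => rw [List.range_succ, List.foldl_append, List.foldl_cons, List.foldl_nil,
      PySem.List.pySetD_natCast, List.length_set, ih]

-- pointwise value of a fold of pySetD writes
lemma pvGetD_setFold (f : Nat → Int) (xs0 : List Int) (n : Nat) (hn : n ≤ xs0.length) (j : Nat) :
    PySem.List.pyGetD ((List.range n).foldl (fun xs (i : Nat) => PySem.List.pySetD xs (i : Int) (f i)) xs0) (j : Int) 0
      = if j < n then f j else PySem.List.pyGetD xs0 (j : Int) 0 := by
  induction n with
  | zero => simp
  | succ n ih =>
    rw [List.range_succ, List.foldl_append, List.foldl_cons, List.foldl_nil,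
      PySem.List.pySetD_natCast, PySem.List.pyGetD_natCast, PySem.List.pyGetD_natCast]
    have hlen := pvLen_setFold f xs0 n
    by_cases hjn : j = n
    · subst hjn
      rw [List.getD_eq_getElem?_getD, List.getElem?_set_self (by omega), if_pos (by omega)]
      rfl
    · rw [List.getD_eq_getElem?_getD, List.getElem?_set_ne (by omega), ← List.getD_eq_getElem?_getD,
        ← PySem.List.pyGetD_natCast, ih (by omega), PySem.List.pyGetD_natCast]
      by_cases hj : j < n
      · rw [if_pos hj, if_pos (by omega)]
      · rw [if_neg hj, if_neg (by omega)]

-- the pair fold splits into two independent folds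
lemma pvFoldPair : ∀ (l : List Nat) (a0 b0 : List Int),
    l.foldl (fun ab (i : Nat) => (PySem.List.pySetD ab.1 (i : Int) (((i % 5 : Nat) : Int) + 1), pvIfB i ab.2)) (a0, b0)
      = (l.foldl (fun xs (i : Nat) => PySem.List.pySetD xs (i : Int) (((i % 5 : Nat) : Int) + 1)) a0,
         l.foldl (fun xs (i : Nat) => PySem.List.pySetD xs (i : Int) (pvFB i)) b0) := by
  intro l
  induction l with
  | nil => intro a0 b0; rfl
  | cons x xs ih =>
    intro a0 b0
    simp only [List.foldl_cons]
    rw [ih]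
    simp [pvIfB_eq]

lemma pvLoopAB_fst (L j : Nat) (hj : j < L) :
    PySem.List.pyGetD (pvLoopAB L).1 (j : Int) 0 = ((j % 5 : Nat) : Int) + 1 := by
  rw [pvLoopAB, pvFoldPair]
  rw [pvGetD_setFold _ _ _ (by simp), if_pos hj]

lemma pvLoopAB_snd (L j : Nat) (hj : j < L) :
    PySem.List.pyGetD (pvLoopAB L).2 (j : Int) 0 = pvFB j := by
  rw [pvLoopAB, pvFoldPair]
  rw [pvGetD_setFold _ _ _ (by simp), if_pos hj]

lemma pvLoopC_getD (L : Nat) : ∀ d (c : List Int) i, L - i ≤ d → c.length = L → i % 2 = 0 →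
    ∀ j : Nat, PySem.List.pyGetD (pvLoopC L c i) (j : Int) 0
      = if i ≤ j ∧ j < L then pvCVal (j - j % 2) else PySem.List.pyGetD c (j : Int) 0 := by
  intro d
  induction d with
  | zero =>
    intro c i hd hc hi j
    rw [pvLoopC, if_neg (by omega), if_neg (by omega)]
  | succ d ih =>
    intro c i hd hc hi j
    rw [pvLoopC]
    by_cases h : i < L
    · rw [if_pos h]
      simp only
      set c1 := PySem.List.pySetD c (i : Int) (pvCVal i) with hc1
      have hlc1 : c1.length = L := by rw [hc1, PySem.List.pySetD_natCast, List.length_set, hc]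
      set c2 := if i + 1 < L then PySem.List.pySetD c1 ((i + 1 : Nat) : Int) (pvCVal i) else c1 with hc2
      have hlc2 : c2.length = L := by
        rw [hc2]; split_ifs <;> simp [hlc1]
      rw [ih c2 (i + 2) (by omega) hlc2 (by omega) j]
      have hgc2 : ∀ k : Nat, PySem.List.pyGetD c2 (k : Int) 0
          = if k = i + 1 ∧ i + 1 < L then pvCVal i
            else if k = i then pvCVal i else PySem.List.pyGetD c (k : Int) 0 := by
        intro k
        rw [hc2, hc1]
        simp only [PySem.List.pySetD_natCast, PySem.List.pyGetD_natCast]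
        by_cases h1 : i + 1 < L
        · rw [if_pos h1]
          by_cases hk1 : k = i + 1
          · subst hk1
            rw [List.getD_eq_getElem?_getD, List.getElem?_set_self (by simp [hc]; omega), if_pos ⟨rfl, h1⟩]
            rfl
          · rw [List.getD_eq_getElem?_getD, List.getElem?_set_ne (by omega), ← List.getD_eq_getElem?_getD,
              if_neg (by tauto)]
            by_cases hk2 : k = i
            · subst hk2
              rw [List.getD_eq_getElem?_getD, List.getElem?_set_self (by omega), if_pos rfl]
              rfl
            · rw [List.getD_eq_getElem?_getD, List.getElem?_set_ne (by omega), ← List.getD_eq_getElem?_getD,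
                if_neg hk2]
        · rw [if_neg h1, if_neg (by tauto)]
          by_cases hk2 : k = i
          · subst hk2
            rw [List.getD_eq_getElem?_getD, List.getElem?_set_self (by omega), if_pos rfl]
            rfl
          · rw [List.getD_eq_getElem?_getD, List.getElem?_set_ne (by omega), ← List.getD_eq_getElem?_getD,
              if_neg hk2]
      by_cases hj2 : i + 2 ≤ j ∧ j < L
      · rw [if_pos hj2, if_pos (by omega)]
      · rw [if_neg hj2, hgc2 j]
        by_cases hj1 : j = i + 1 ∧ i + 1 < L
        · rw [if_pos hj1, if_pos (by omega)]
          congr 1; omega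
        · rw [if_neg hj1]
          by_cases hj0 : j = i
          · rw [if_pos hj0, if_pos (by omega)]
            congr 1; omega
          · rw [if_neg hj0, if_neg (by omega)]
    · rw [if_neg h, if_neg (by omega)]

-- bridges from A's index formulas to the cyclic lookups of pvStepA
lemma pvBridge1 (j : Nat) :
    ((j % 5 : Nat) : Int) + 1 = PySem.List.pyGetD pvP1 (PySem.Int.mod (j : Int) 5) 0 := by
  have hm : PySem.Int.mod (j : Int) 5 = ((j % 5 : Nat) : Int) := by
    exact_mod_cast PySem.Int.mod_natCast j 5
  rw [hm, PySem.List.pyGetD_natCast]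
  have h5 : j % 5 = 0 ∨ j % 5 = 1 ∨ j % 5 = 2 ∨ j % 5 = 3 ∨ j % 5 = 4 := by omega
  rcases h5 with h | h | h | h | h <;> rw [h] <;> decide

lemma pvBridge2 (j : Nat) :
    pvFB j = PySem.List.pyGetD pvP2 (PySem.Int.mod (j : Int) 8) 0 := by
  have hm : PySem.Int.mod (j : Int) 8 = ((j % 8 : Nat) : Int) := by
    exact_mod_cast PySem.Int.mod_natCast j 8
  have h2 : j % 2 = j % 8 % 2 := (Nat.mod_mod_of_dvd j (by norm_num)).symm
  rw [hm, PySem.List.pyGetD_natCast, pvFB, h2]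
  have h8 : j % 8 = 0 ∨ j % 8 = 1 ∨ j % 8 = 2 ∨ j % 8 = 3 ∨ j % 8 = 4 ∨ j % 8 = 5 ∨ j % 8 = 6 ∨ j % 8 = 7 := by omega
  rcases h8 with h | h | h | h | h | h | h | h <;> rw [h] <;> decide

lemma pvBridge3 (j : Nat) :
    pvCVal (j - j % 2) = PySem.List.pyGetD pvP3 (PySem.Int.mod (j : Int) 10) 0 := by
  have hm : PySem.Int.mod (j : Int) 10 = ((j % 10 : Nat) : Int) := by
    exact_mod_cast PySem.Int.mod_natCast j 10
  have h1 : (j - j % 2) % 10 = j % 10 - j % 10 % 2 := by omega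
  rw [hm, PySem.List.pyGetD_natCast, pvCVal, h1]
  have h10 : j % 10 = 0 ∨ j % 10 = 1 ∨ j % 10 = 2 ∨ j % 10 = 3 ∨ j % 10 = 4 ∨ j % 10 = 5 ∨
      j % 10 = 6 ∨ j % 10 = 7 ∨ j % 10 = 8 ∨ j % 10 = 9 := by omega
  rcases h10 with h | h | h | h | h | h | h | h | h | h <;> rw [h] <;> decide

-- A's counting loop equals the pvStepA fold over the remaining enumerate suffix
lemma pvCount_eq (answers : List Int) :
    ∀ d j s, answers.length - j ≤ d →
      pvLoopJ answers (pvLoopAB answers.length).1 (pvLoopAB answers.length).2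
        (pvLoopC answers.length (List.replicate answers.length 0) 0) j s
      = (PySem.List.enumerate (answers.drop j) (j : Int)).foldl pvStepA s := by
  intro d
  induction d with
  | zero =>
    intro j s hd
    rw [pvLoopJ, if_neg (by omega), List.drop_eq_nil_of_le (by omega)]
    rfl
  | succ d ih =>
    intro j s hd
    by_cases h : j < answers.length
    · rw [pvLoopJ, if_pos h]
      simp only
      have hx : PySem.List.pyGetD answers (j : Int) 0 = answers[j] :=
        PySem.List.pyGetD_ofNat answers j 0 h
      rw [hx, pvLoopAB_fst _ _ h, pvLoopAB_snd _ _ h,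
        pvLoopC_getD answers.length answers.length _ 0 (by omega) (by simp) (by omega) j,
        if_pos (show 0 ≤ j ∧ j < answers.length from ⟨Nat.zero_le j, h⟩),
        pvBridge1, pvBridge2, pvBridge3]
      rw [ih (j + 1) _ (by omega)]
      rw [List.drop_eq_getElem_cons h, PySem.List.enumerate_cons, List.foldl_cons]
      push_cast
      rfl
    · rw [pvLoopJ, if_neg h, List.drop_eq_nil_of_le (by omega)]
      rfl

-- the pvStepA fold is the triple of single-pattern counts
lemma pvStepA_fold : ∀ (xs : List Int) (k : Nat) (s : Int × Int × Int),
    (PySem.List.enumerate xs (k : Int)).foldl pvStepA s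
      = (s.1 + pvCnt pvP1 5 xs k, s.2.1 + pvCnt pvP2 8 xs k, s.2.2 + pvCnt pvP3 10 xs k) := by
  intro xs
  induction xs with
  | nil => intro k s; simp [pvCnt, PySem.List.enumerate]
  | cons x xs ih =>
    intro k s
    rw [PySem.List.enumerate_cons, List.foldl_cons]
    have h1 : ((k : Int) + 1) = ((k + 1 : Nat) : Int) := by push_cast; ring
    rw [h1, ih]
    simp only [pvStepA, pvCnt]
    split_ifs <;> simp only [Prod.mk.injEq] <;> refine ⟨by ring, by ring, by ring⟩

-- the frequency dict is a counter of the (i % 40, v) key list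
lemma pvFreq_getD (answers : List Int) (key : Int × Int) :
    (pvFreq answers).getD key 0
      = (((PySem.List.enumerate answers).map (fun iv => (PySem.Int.mod iv.1 40, iv.2))).count key : Int) := by
  have h : pvFreq answers
      = (((PySem.List.enumerate answers).map (fun iv => (PySem.Int.mod iv.1 40, iv.2))).foldl
          (fun d x => d.insert x (d.getD x 0 + 1)) PySem.Dict.empty) := by
    rw [List.foldl_map]
    rfl
  rw [h, PySem.Dict.foldl_insert_getD_add_one_eq_counter, PySem.Dict.getD_counter]

-- a sum-accumulating fold over range(n) is a Finset.range sum
lemma pvFoldRange (f : Int → Int) : ∀ (n : Nat) (init : Int),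
    (PySem.List.pyRange 0 (n : Int) 1).foldl (fun s r => s + f r) init
      = init + ∑ r ∈ Finset.range n, f (r : Int) := by
  intro n
  induction n with
  | zero => intro init; rw [PySem.List.pyRange_one_eq_nil (by omega)]; simp
  | succ n ih =>
    intro init
    have h1 : ((n + 1 : Nat) : Int) = (n : Int) + 1 := by push_cast; ring
    rw [h1, PySem.List.pyRange_one_succ_right (by omega), List.foldl_append, List.foldl_cons,
      List.foldl_nil, ih, Finset.sum_range_succ]
    ring

-- the residue-histogram total equals the single-pattern cyclic count
lemma pvMain (p : List Int) (P : Nat) (hdvd : P ∣ 40) :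
    ∀ (xs : List Int) (k : Nat),
      (∑ r ∈ Finset.range 40,
        ((((PySem.List.enumerate xs (k : Int)).map (fun iv => (PySem.Int.mod iv.1 40, iv.2))).count
          (((r : Nat) : Int), PySem.List.pyGetD p (PySem.Int.mod (r : Int) (P : Int)) 0) : Int)))
      = pvCnt p (P : Int) xs k := by
  intro xs
  induction xs with
  | nil => intro k; simp [pvCnt, PySem.List.enumerate]
  | cons x xs ih =>
    intro k
    rw [PySem.List.enumerate_cons]
    have h1 : ((k : Int) + 1) = ((k + 1 : Nat) : Int) := by push_cast; ring
    rw [h1]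
    have hk40 : PySem.Int.mod ((k : Nat) : Int) 40 = ((k % 40 : Nat) : Int) := by
      exact_mod_cast PySem.Int.mod_natCast k 40
    have hsplit : ∀ r : Nat,
        ((((PySem.Int.mod (k : Int) 40, x) ::
            (PySem.List.enumerate xs ((k + 1 : Nat) : Int)).map (fun iv => (PySem.Int.mod iv.1 40, iv.2))).count
          (((r : Nat) : Int), PySem.List.pyGetD p (PySem.Int.mod (r : Int) (P : Int)) 0) : Int))
        = (((PySem.List.enumerate xs ((k + 1 : Nat) : Int)).map (fun iv => (PySem.Int.mod iv.1 40, iv.2))).count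
            (((r : Nat) : Int), PySem.List.pyGetD p (PySem.Int.mod (r : Int) (P : Int)) 0) : Int)
          + (if r = k % 40 ∧ x = PySem.List.pyGetD p (PySem.Int.mod (r : Int) (P : Int)) 0 then 1 else 0) := by
      intro r
      rw [List.count_cons, Nat.cast_add]
      congr 1
      have hiff : ((PySem.Int.mod (k : Int) 40, x)
            = (((r : Nat) : Int), PySem.List.pyGetD p (PySem.Int.mod (r : Int) (P : Int)) 0))
          ↔ (r = k % 40 ∧ x = PySem.List.pyGetD p (PySem.Int.mod (r : Int) (P : Int)) 0) := by
        rw [hk40, Prod.mk.injEq]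
        constructor
        · rintro ⟨hl, hr2⟩
          have hn : k % 40 = r := by exact_mod_cast hl
          exact ⟨hn.symm, hr2⟩
        · rintro ⟨hl, hr2⟩
          exact ⟨by rw [hl], hr2⟩
      by_cases hcond : r = k % 40 ∧ x = PySem.List.pyGetD p (PySem.Int.mod (r : Int) (P : Int)) 0
      · rw [if_pos hcond, if_pos (beq_iff_eq.mpr (hiff.mpr hcond))]
        norm_num
      · rw [if_neg hcond, if_neg (fun hb => hcond (hiff.mp (beq_iff_eq.mp hb)))]
        norm_num
    rw [List.map_cons, Finset.sum_congr rfl (fun r _ => hsplit r), Finset.sum_add_distrib, ih (k + 1)]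
    have hval : PySem.List.pyGetD p (PySem.Int.mod (((k % 40 : Nat)) : Int) (P : Int)) 0
        = PySem.List.pyGetD p (PySem.Int.mod ((k : Nat) : Int) (P : Int)) 0 := by
      have ha : PySem.Int.mod (((k % 40 : Nat)) : Int) (P : Int) = (((k % 40) % P : Nat) : Int) := by
        exact_mod_cast PySem.Int.mod_natCast (k % 40) P
      have hb : PySem.Int.mod ((k : Nat) : Int) (P : Int) = ((k % P : Nat) : Int) := by
        exact_mod_cast PySem.Int.mod_natCast k P
      rw [ha, hb, Nat.mod_mod_of_dvd k hdvd]
    have hind : (∑ r ∈ Finset.range 40,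
        (if r = k % 40 ∧ x = PySem.List.pyGetD p (PySem.Int.mod (r : Int) (P : Int)) 0 then (1 : Int) else 0))
        = (if x = PySem.List.pyGetD p (PySem.Int.mod ((k : Nat) : Int) (P : Int)) 0 then 1 else 0) := by
      simp only [ite_and]
      rw [Finset.sum_ite_eq_of_mem' (Finset.range 40) (k % 40)
        (fun r => if x = PySem.List.pyGetD p (PySem.Int.mod ((r : Nat) : Int) (P : Int)) 0 then (1 : Int) else 0)
        (Finset.mem_range.mpr (by omega))]
      rw [hval]
    rw [hind, pvCnt]
    ring

-- each score of B equals the single-pattern cyclic count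
lemma pvScore_eq (answers p : List Int) (P : Nat) (hdvd : P ∣ 40)
    (hlen : (p.length : Int) = (P : Int)) :
    pvScore (pvFreq answers) p = pvCnt p (P : Int) answers 0 := by
  rw [pvScore]
  have h40 : (40 : Int) = ((40 : Nat) : Int) := by norm_num
  rw [hlen, h40, pvFoldRange
    (fun r => (pvFreq answers).getD (r, PySem.List.pyGetD p (PySem.Int.mod r (P : Int)) 0) 0) 40 0]
  rw [zero_add]
  have := pvMain p P hdvd answers 0
  rw [show ((0 : Nat) : Int) = (0 : Int) from rfl] at this
  rw [← this]
  exact Finset.sum_congr rfl (fun r _ => pvFreq_getD answers _)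

-- the final selection of [1,2,3] agrees between A's append chain and B's filterMap
lemma pvFinal (m x y z : Int) :
    (if m = z then (if m = y then (if m = x then ([] : List Int) ++ [1] else []) ++ [2]
                    else (if m = x then ([] : List Int) ++ [1] else [])) ++ [3]
     else (if m = y then (if m = x then ([] : List Int) ++ [1] else []) ++ [2]
           else (if m = x then ([] : List Int) ++ [1] else [])))
    = List.filterMap (fun ks : Int × Int => if ks.2 = m then some ks.1 else none)
        [(1, x), (2, y), (3, z)] := by
  by_cases h1 : m = x <;> by_cases h2 : m = y <;> by_cases h3 : m = z <;>
    simp_all [List.filterMap_cons, eq_comm]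

-- ===== VERDICT (by name: the statement is the Claim_ definition above) =====
theorem solution_spec : Claim_equal_solution := by
  unfold Claim_equal_solution Spec_solution
  intro answers _
  show solution answers = solution_alt answers
  simp only [solution, solution_alt]
  have hcount := pvCount_eq answers answers.length 0 (0, 0, 0) (by omega)
  rw [List.drop_zero, Nat.cast_zero] at hcount
  rw [hcount]
  have hfold := pvStepA_fold answers 0 (0, 0, 0)
  rw [Nat.cast_zero] at hfold
  rw [hfold]
  have hs1 := pvScore_eq answers pvP1 5 (by norm_num) (by norm_num [pvP1])
  have hs2 := pvScore_eq answers pvP2 8 (by norm_num) (by norm_num [pvP2])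
  have hs3 := pvScore_eq answers pvP3 10 (by norm_num) (by norm_num [pvP3])
  rw [show ((5 : Nat) : Int) = 5 from by norm_num] at hs1
  rw [show ((8 : Nat) : Int) = 8 from by norm_num] at hs2
  rw [show ((10 : Nat) : Int) = 10 from by norm_num] at hs3
  rw [hs1, hs2, hs3]
  simp only [zero_add]
  exact pvFinal _ _ _ _
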